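-- pv_equiv track=rewrite | github.com/oishy28/LeetCode | Stack/removemiddlenumber.py | Remove_Middle
-- ===== SOURCE A (Python) =====
-- class Stack:
--     def __init__(self):
--         self.items = []
--
--     def push(self, item):
--         self.items.append(item)
--
--     def pop(self):
--         return self.items.pop()
--
--     def is_empty(self):
--         return len(self.items) == 0
--
--     def peek(self):
--         return self.items[-1] if not self.is_empty() else None
--
--     def size(self):
--         return len(self.items)
--
--     def __str__(self):
--         return str(self.items)
--
-- def Remove_Middle(s):
--     stack1 = Stack()
--     n = len(s)
--     middle_index = n // 2
--
--     # Push all elements except the middle into stack1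
--     for i in range(n-1,-1, -1):
--         if i != middle_index:
--             stack1.push(s[i])
--
--
--
--     return stack1.items
-- ===== SOURCE B (Python) =====
-- def Remove_Middle(s):
--     mid = len(s) // 2
--     return (s[:mid] + s[mid+1:])[::-1]
-- ===== Notes on version B (the rewrite author's own statement) =====
-- stated objective: simpler
-- what changed: Replaced the Stack class and the descending index loop that skips the middle with two slices, a concatenation and a single reversal.
import Mathlib
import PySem

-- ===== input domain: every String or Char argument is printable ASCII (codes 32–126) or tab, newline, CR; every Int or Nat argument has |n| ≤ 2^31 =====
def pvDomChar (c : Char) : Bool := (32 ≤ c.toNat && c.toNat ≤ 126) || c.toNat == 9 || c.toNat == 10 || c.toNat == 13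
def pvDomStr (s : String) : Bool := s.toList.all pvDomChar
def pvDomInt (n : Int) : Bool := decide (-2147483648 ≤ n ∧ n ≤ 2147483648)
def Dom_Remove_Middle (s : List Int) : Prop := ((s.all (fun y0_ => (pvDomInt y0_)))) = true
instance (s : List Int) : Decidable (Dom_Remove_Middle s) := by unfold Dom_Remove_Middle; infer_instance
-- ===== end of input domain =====

-- B replaces A's Stack object and descending skip-the-middle loop by two slices, a concatenation
-- and one reversal (objective: simpler).

-- ===== PORT A =====
-- stack1.items is the accumulator list; push appends on the right.
def Remove_Middle (s : List Int) : List Int :=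
  let n : Int := s.length
  let middle_index : Int := PySem.Int.floordiv n 2
  (PySem.List.pyRange (n - 1) (-1) (-1)).foldl
    (fun stack1 i => if i ≠ middle_index then stack1 ++ [PySem.List.pyGetD s i 0] else stack1) []

-- ===== PORT B =====
def Remove_Middle_alt (s : List Int) : List Int :=
  let mid : Int := PySem.Int.floordiv (s.length : Int) 2
  (PySem.List.slice s none (some mid) ++ PySem.List.slice s (some (mid + 1)) none).reverse

-- ===== PRECONDITION & SPEC =====
def Spec_Remove_Middle (s : List Int) (out : List Int) : Prop := out = Remove_Middle_alt s
instance (s : List Int) (out : List Int) : Decidable (Spec_Remove_Middle s out) := by unfold Spec_Remove_Middle; infer_instance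

-- ===== CLAIM (what is proved, stated in full; the proofs are below) =====
def Claim_equal_Remove_Middle : Prop := ∀ (s : List Int), Dom_Remove_Middle s → Spec_Remove_Middle s (Remove_Middle s)

-- ===== LEMMAS AND PROOFS =====

-- A's loop body as filter+map
theorem rm_foldl_push (g : Int → Int) (mid : Int) (l : List Int) (acc : List Int) :
    l.foldl (fun a i => if i ≠ mid then a ++ [g i] else a) acc
      = acc ++ (l.filter (fun i => i ≠ mid)).map g := by
  induction l generalizing acc with
  | nil => simp
  | cons x xs ih =>
      by_cases h : x = mid
      · simp only [List.foldl_cons]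
        rw [show (if x ≠ mid then acc ++ [g x] else acc) = acc from if_neg (by simp [h]), ih]
        simp [h]
      · simp only [List.foldl_cons]
        rw [show (if x ≠ mid then acc ++ [g x] else acc) = acc ++ [g x] from if_pos h, ih]
        simp [h]

theorem rm_map_range_take (s : List Int) (m : Nat) (hm : m ≤ s.length) :
    ((PySem.List.pyRange 0 (s.length : Int) 1).filter (fun i => i ≠ (m : Int))).map
      (fun i => PySem.List.pyGetD s i 0)
      = s.take m ++ s.drop (m + 1) := by
  rcases Nat.lt_or_ge m s.length with hlt | hge
  · have hsplit : PySem.List.pyRange 0 (s.length : Int) 1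
        = PySem.List.pyRange 0 (m : Int) 1 ++ ((m : Int) :: PySem.List.pyRange ((m : Int) + 1) (s.length : Int) 1) := by
      rw [PySem.List.pyRange_one_append 0 (m : Int) (s.length : Int) (by omega) (by exact_mod_cast hm),
          PySem.List.pyRange_one_cons (a := (m : Int)) (b := (s.length : Int)) (by exact_mod_cast hlt)]
    rw [hsplit]
    have h1 : (PySem.List.pyRange 0 (m : Int) 1).filter (fun i => i ≠ (m : Int))
        = PySem.List.pyRange 0 (m : Int) 1 := by
      apply List.filter_eq_self.mpr
      intro a ha
      have := (PySem.List.mem_pyRange_one).mp ha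
      simp; omega
    have h2 : (PySem.List.pyRange ((m : Int) + 1) (s.length : Int) 1).filter (fun i => i ≠ (m : Int))
        = PySem.List.pyRange ((m : Int) + 1) (s.length : Int) 1 := by
      apply List.filter_eq_self.mpr
      intro a ha
      have := (PySem.List.mem_pyRange_one).mp ha
      simp; omega
    have hd : (PySem.List.pyRange ((m : Int) + 1) (s.length : Int) 1).map
        (fun i => PySem.List.pyGetD s i 0) = s.drop (m + 1) := by
      have h := PySem.List.map_pyGetD_pyRange' s (0 : Int) (a := (m : Int) + 1) (by omega)
      rw [show ((m : Int) + 1).toNat = m + 1 by omega] at h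
      exact h
    have ht : (PySem.List.pyRange 0 (m : Int) 1).map (fun i => PySem.List.pyGetD s i 0)
        = s.take m := by
      have hall : (PySem.List.pyRange 0 (s.length : Int) 1).map (fun i => PySem.List.pyGetD s i 0) = s :=
        PySem.List.map_pyGetD_pyRange_zero' s 0
      have hsp2 : PySem.List.pyRange 0 (s.length : Int) 1
          = PySem.List.pyRange 0 (m : Int) 1 ++ PySem.List.pyRange (m : Int) (s.length : Int) 1 :=
        PySem.List.pyRange_one_append 0 (m : Int) (s.length : Int) (by omega) (by exact_mod_cast hm)
      have hlen : ((PySem.List.pyRange 0 (m : Int) 1).map (fun i => PySem.List.pyGetD s i 0)).length = m := by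
        simp [PySem.List.length_pyRange_one]
      calc (PySem.List.pyRange 0 (m : Int) 1).map (fun i => PySem.List.pyGetD s i 0)
          = (((PySem.List.pyRange 0 (m : Int) 1).map (fun i => PySem.List.pyGetD s i 0))
              ++ ((PySem.List.pyRange (m : Int) (s.length : Int) 1).map (fun i => PySem.List.pyGetD s i 0))).take m := by
              rw [List.take_append_of_le_length (by omega), List.take_of_length_le (by omega)]
        _ = s.take m := by rw [← List.map_append, ← hsp2, hall]
    simp only [decide_not] at h1 h2
    rw [List.filter_append, List.filter_cons]
    simp [h1, h2, hd, ht]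
  · -- m ≥ length, so (with hm) m = length; only possible when combined gives take/drop beyond
    have hme : m = s.length := le_antisymm hm hge
    subst hme
    have h1 : (PySem.List.pyRange 0 (s.length : Int) 1).filter (fun i => i ≠ (s.length : Int))
        = PySem.List.pyRange 0 (s.length : Int) 1 := by
      apply List.filter_eq_self.mpr
      intro a ha
      have := (PySem.List.mem_pyRange_one).mp ha
      simp; omega
    rw [h1, PySem.List.map_pyGetD_pyRange_zero' s 0]
    simp

theorem Remove_Middle_eq (s : List Int) : Remove_Middle s = Remove_Middle_alt s := by
  unfold Remove_Middle Remove_Middle_alt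
  set n : Int := (s.length : Int) with hn
  have hmid : PySem.Int.floordiv n 2 = ((s.length / 2 : Nat) : Int) := by
    rw [PySem.Int.floordiv_eq_ediv_of_pos (by norm_num), hn]
    omega
  set m : Nat := s.length / 2 with hm
  have hmle : m ≤ s.length := Nat.div_le_self _ _
  simp only [hmid]
  rw [rm_foldl_push]
  rw [PySem.List.pyRange_neg_one_eq_reverse]
  have : (-1 : Int) + 1 = 0 := by norm_num
  rw [this, show n - 1 + 1 = n from by ring]
  rw [List.filter_reverse, List.map_reverse]
  rw [show n = (s.length : Int) from hn]
  rw [rm_map_range_take s m hmle]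
  -- B side: slices to take/drop
  rw [PySem.List.slice_to_natCast]
  rw [show ((m : Int) + 1) = ((m + 1 : Nat) : Int) by push_cast; ring]
  rw [PySem.List.slice_from_natCast]
  simp

-- ===== VERDICT (by name: the statement is the Claim_ definition above) =====
theorem Remove_Middle_spec : Claim_equal_Remove_Middle := by
  intro s _
  unfold Spec_Remove_Middle
  exact Remove_Middle_eq s
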